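-- pv_equiv track=rewrite | github.com/awnjuul/python | mypackage/module2.py | CodeLang
-- ===== SOURCE A (Python) =====
-- def CodeLang(lang: str) -> str:
--     lang_dict = {
--         "English": "en",
--         "Spanish": "es",
--         "Ukrainian": "uk"
--     }
--     if lang in lang_dict:
--         return lang_dict[lang]
--     elif lang in lang_dict.values():
--         for name, code in lang_dict.items():
--             if code == lang:
--                 return name
--     else:
--         return "Language not found"
-- ===== SOURCE B (Python) =====
-- def CodeLang(lang: str) -> str:
--     # Recursive scan over (name, code) pairs, checking both directions per pair;
--     # no dict and no membership tests at all.
--     def go(pairs):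
--         if not pairs:
--             return "Language not found"
--         name, code = pairs[0]
--         if lang == name:
--             return code
--         if lang == code:
--             return name
--         return go(pairs[1:])
--     return go([("English", "en"), ("Spanish", "es"), ("Ukrainian", "uk")])
-- ===== Notes on version B (the rewrite author's own statement) =====
-- stated objective: alternative
-- what changed: B drops the dict entirely: a single recursive scan over the three (name, code) pairs answers both directions in one pass (return code on a name match, name on a code match), replacing A's two dict-membership branches plus a separate reverse for-loop over items.
import Mathlib
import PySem

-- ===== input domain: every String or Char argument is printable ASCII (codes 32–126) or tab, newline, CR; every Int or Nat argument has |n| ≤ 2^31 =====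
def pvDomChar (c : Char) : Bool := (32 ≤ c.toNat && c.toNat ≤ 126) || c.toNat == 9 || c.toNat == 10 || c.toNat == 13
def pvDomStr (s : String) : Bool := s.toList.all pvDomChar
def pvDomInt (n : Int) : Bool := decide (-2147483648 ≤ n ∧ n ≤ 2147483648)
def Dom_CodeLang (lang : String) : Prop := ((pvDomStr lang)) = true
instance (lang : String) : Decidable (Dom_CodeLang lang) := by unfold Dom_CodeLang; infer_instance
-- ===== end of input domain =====

-- B drops A's dict and its membership branches: one recursive scan over the (name, code) pairs answers both directions (alternative decomposition).

-- ===== PORT A =====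
-- the forward dict A builds
def pvLangDict : PySem.Dict String String :=
  PySem.Dict.ofList [("English", "en"), ("Spanish", "es"), ("Ukrainian", "uk")]

-- the 'for name, code in lang_dict.items(): if code == lang: return name' loop (first match)
def pvRevScan (lang : String) : List (String × String) → Option String
  | [] => none
  | (name, code) :: rest => if code == lang then some name else pvRevScan lang rest

def CodeLang (lang : String) : String :=
  if pvLangDict.contains lang then (pvLangDict.get? lang).getD ""
  else if lang ∈ pvLangDict.values then (pvRevScan lang pvLangDict.items).getD ""
  else "Language not found"

-- ===== PORT B =====
-- Source B's recursive helper 'go': both-direction check per pair, no dict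
def pvGo (lang : String) : List (String × String) → String
  | [] => "Language not found"
  | (name, code) :: rest =>
    if lang == name then code
    else if lang == code then name
    else pvGo lang rest

def CodeLang_alt (lang : String) : String :=
  pvGo lang [("English", "en"), ("Spanish", "es"), ("Ukrainian", "uk")]

-- ===== PRECONDITION & SPEC =====
def Spec_CodeLang (lang : String) (out : String) : Prop := out = CodeLang_alt lang
instance (lang : String) (out : String) : Decidable (Spec_CodeLang lang out) := by unfold Spec_CodeLang; infer_instance

-- ===== CLAIM (what is proved, stated in full; the proofs are below) =====
def Claim_equal_CodeLang : Prop := ∀ (lang : String), Dom_CodeLang lang → Spec_CodeLang lang (CodeLang lang)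

-- ===== LEMMAS AND PROOFS =====

-- ===== VERDICT (by name: the statement is the Claim_ definition above) =====
theorem CodeLang_spec : Claim_equal_CodeLang := by
  intro lang _
  have hA : pvLangDict =
      PySem.Dict.mk [("English", "en"), ("Spanish", "es"), ("Ukrainian", "uk")] := by decide
  unfold Spec_CodeLang CodeLang CodeLang_alt
  rw [hA]
  by_cases h1 : lang = "English"
  · subst h1; decide
  by_cases h2 : lang = "Spanish"
  · subst h2; decide
  by_cases h3 : lang = "Ukrainian"
  · subst h3; decide
  by_cases h4 : lang = "en"
  · subst h4; decide
  by_cases h5 : lang = "es"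
  · subst h5; decide
  by_cases h6 : lang = "uk"
  · subst h6; decide
  have e : ∀ s : String, lang ≠ s → (s == lang) = false := by
    intro s h
    simp only [beq_eq_false_iff_ne, ne_eq]
    exact fun hc => h hc.symm
  have e' : ∀ s : String, lang ≠ s → (lang == s) = false := by
    intro s h; simpa using h
  simp [pvGo, PySem.Dict.contains, PySem.Dict.values,
    e _ h1, e _ h2, e _ h3,
    e' _ h1, e' _ h2, e' _ h3, e' _ h4, e' _ h5, e' _ h6, h4, h5, h6]
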